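-- pv_equiv track=rewrite | github.com/dinleo/CodeTest | PyCode/Naver/2.py | solution
-- ===== SOURCE A (Python) =====
-- def solution(A):
--     answer = 0
--     paint = True
--     layer = 0
--     while paint:
--         paint = False
--         tic = False
--         layer += 1
--         for h in A:
--             if not tic and layer <= h:
--                 tic = True
--                 answer += 1
--                 paint = True
--             elif h < layer:
--                 tic = False
--     if 1000000000 < answer:
--         return -1
--     return answer
-- ===== SOURCE B (Python) =====
-- def solution(A):
--     ans = 0
--     prev = 0
--     for h in A:
--         d = h - max(prev, 0)
--         if d > 0:
--             ans += d
--         prev = h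
--     if 1000000000 < ans:
--         return -1
--     return ans
-- ===== Notes on version B (the rewrite author's own statement) =====
-- stated objective: faster
-- what changed: Replaces the layer-by-layer sweep (one pass over A per paint layer, O(n*maxH)) by a single pass summing each bar's positive rise over its clamped predecessor, keeping the same >1e9 -> -1 cap.
import Mathlib
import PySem

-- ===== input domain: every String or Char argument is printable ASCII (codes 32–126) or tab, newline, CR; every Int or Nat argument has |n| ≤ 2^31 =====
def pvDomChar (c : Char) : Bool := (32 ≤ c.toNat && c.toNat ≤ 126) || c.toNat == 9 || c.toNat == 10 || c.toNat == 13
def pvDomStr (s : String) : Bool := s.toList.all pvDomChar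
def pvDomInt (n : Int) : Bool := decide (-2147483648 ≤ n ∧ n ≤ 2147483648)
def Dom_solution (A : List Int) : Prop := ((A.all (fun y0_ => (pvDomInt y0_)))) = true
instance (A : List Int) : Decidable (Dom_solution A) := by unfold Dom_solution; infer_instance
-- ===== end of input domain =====

-- B replaces A's layer-by-layer repainting sweep by a single pass summing positive rises; objective: faster (O(n) vs O(n*maxH)).

-- ===== PORT A =====
-- A's inner for-loop over A with state (answer, tic, paint), branch for branch
def aPass (l : Int) (s : Int × Bool × Bool) : List Int → Int × Bool × Bool
  | [] => s
  | h :: t =>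
      aPass l
        (if s.2.1 = false ∧ l ≤ h then (s.1 + 1, true, true)
         else if h < l then (s.1, false, s.2.2)
         else s) t

-- abstractions of the pass (cited by the port's termination proof)
def maxA (A : List Int) : Int := A.foldr max 0

def passC (l : Int) : Bool → List Int → Int
  | _, [] => 0
  | tic, h :: t =>
      if tic = false ∧ l ≤ h then 1 + passC l true t
      else if h < l then passC l false t
      else passC l tic t

def ticF (l : Int) : Bool → List Int → Bool
  | tic, [] => tic
  | tic, h :: t =>
      ticF l (if tic = false ∧ l ≤ h then true else if h < l then false else tic) t

theorem passC_nonneg (l : Int) (xs : List Int) : ∀ tic, 0 ≤ passC l tic xs := by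
  induction xs with
  | nil => intro tic; simp [passC]
  | cons h t ih =>
      intro tic
      simp only [passC]
      split_ifs
      · have := ih true; omega
      · exact ih false
      · exact ih tic

theorem passC_pos_exists (l : Int) (xs : List Int) :
    ∀ tic, 0 < passC l tic xs → ∃ x ∈ xs, l ≤ x := by
  induction xs with
  | nil => intro tic h; simp [passC] at h
  | cons h t ih =>
      intro tic hp
      simp only [passC] at hp
      split_ifs at hp with c1 c2
      · exact ⟨h, List.mem_cons_self, c1.2⟩
      · obtain ⟨x, hx, hlx⟩ := ih false hp
        exact ⟨x, List.mem_cons_of_mem _ hx, hlx⟩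
      · obtain ⟨x, hx, hlx⟩ := ih tic hp
        exact ⟨x, List.mem_cons_of_mem _ hx, hlx⟩

theorem mem_le_maxA (xs : List Int) : ∀ x ∈ xs, x ≤ maxA xs := by
  induction xs with
  | nil => simp
  | cons h t ih =>
      intro x hx
      have hstep : maxA (h :: t) = max h (maxA t) := rfl
      rcases List.mem_cons.mp hx with h1 | h1
      · rw [hstep, h1]; exact le_max_left _ _
      · rw [hstep]; exact le_trans (ih x h1) (le_max_right _ _)

theorem aPass_eq (l : Int) (xs : List Int) :
    ∀ tic paint ans, aPass l (ans, tic, paint) xs =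
      (ans + passC l tic xs, ticF l tic xs, paint || decide (0 < passC l tic xs)) := by
  induction xs with
  | nil => intro tic paint ans; simp [aPass, passC, ticF]
  | cons h t ih =>
      intro tic paint ans
      simp only [aPass, passC, ticF]
      split_ifs with c1 c2
      · rw [ih]
        have hnn := passC_nonneg l t true
        have hpos : decide (0 < 1 + passC l true t) = true := by
          simp only [decide_eq_true_eq]; omega
        rw [hpos]
        simp only [Bool.or_true, Prod.mk.injEq]
        exact ⟨by omega, by trivial, by trivial⟩
      · rw [ih]
      · rw [ih]

-- port of A's while loop: one pass per layer, repeated while something was painted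
def aLoop (A : List Int) (answer layer : Int) : Int :=
  let r := aPass (layer + 1) (answer, false, false) A
  if r.2.2 then aLoop A r.1 (layer + 1) else r.1
termination_by (maxA A + 1 - layer).toNat
decreasing_by
  rename_i hr
  have hr2 : (aPass (layer + 1) (answer, false, false) A).2.2 = true := hr
  rw [aPass_eq] at hr2
  replace hr := hr2
  simp only [Bool.false_or, decide_eq_true_eq] at hr
  obtain ⟨x, hx, hlx⟩ := passC_pos_exists _ _ _ hr
  have hmax := mem_le_maxA A x hx
  omega

def solution (A : List Int) : Int :=
  let answer := aLoop A 0 0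
  if (1000000000 : Int) < answer then -1 else answer

-- ===== PORT B =====
def solution_alt (A : List Int) : Int :=
  let p := A.foldl
    (fun (s : Int × Int) h =>
      (if 0 < h - max s.2 0 then s.1 + (h - max s.2 0) else s.1, h)) (0, 0)
  if (1000000000 : Int) < p.1 then -1 else p.1

-- ===== PRECONDITION & SPEC =====
def Spec_solution (A : List Int) (out : Int) : Prop := out = solution_alt A
instance (A : List Int) (out : Int) : Decidable (Spec_solution A out) := by unfold Spec_solution; infer_instance

-- ===== CLAIM (what is proved, stated in full; the proofs are below) =====
def Claim_equal_solution : Prop := ∀ (A : List Int), Dom_solution A → Spec_solution A (solution A)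

-- ===== LEMMAS AND PROOFS =====

-- G layer prev xs: total strokes on layers strictly above `layer`, previous bar height `prev`
def G (layer : Int) : Int → List Int → Int
  | _, [] => 0
  | prev, h :: t => max 0 (h - max prev layer) + G layer h t

theorem G_step (xs : List Int) :
    ∀ layer prev, G layer prev xs =
      passC (layer + 1) (decide (layer + 1 ≤ prev)) xs + G (layer + 1) prev xs := by
  induction xs with
  | nil => intro layer prev; simp [G, passC]
  | cons h t ih =>
      intro layer prev
      simp only [G, passC]
      rw [ih layer h]
      split_ifs with c1 c2
      · obtain ⟨c1a, c1b⟩ := c1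
        have hp : ¬ (layer + 1 ≤ prev) := by
          intro hc; rw [decide_eq_true hc] at c1a; cases c1a
        rw [decide_eq_true c1b]
        simp only [max_def]; split_ifs <;> omega
      · have hh : ¬ (layer + 1 ≤ h) := by omega
        rw [decide_eq_false hh]
        simp only [max_def]; split_ifs <;> omega
      · have hh : layer + 1 ≤ h := by omega
        have hp : layer + 1 ≤ prev := by
          by_contra hq
          exact c1 ⟨decide_eq_false hq, hh⟩
        rw [decide_eq_true hh, decide_eq_true hp]
        simp only [max_def]; split_ifs <;> omega

theorem passC_zero_all_lt (l : Int) (xs : List Int) :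
    passC l false xs = 0 → ∀ x ∈ xs, x < l := by
  induction xs with
  | nil => simp
  | cons h t ih =>
      intro hz x hx
      simp only [passC] at hz
      split_ifs at hz with c1 c2
      · have := passC_nonneg l t true; omega
      · rcases List.mem_cons.mp hx with h1 | h1
        · omega
        · exact ih hz x h1
      · have hh : ¬ (l ≤ h) := fun hc => c1 ⟨trivial, hc⟩
        omega

theorem G_zero (xs : List Int) (layer : Int)
    (hall : ∀ x ∈ xs, x < layer + 1) : ∀ prev, G layer prev xs = 0 := by
  induction xs with
  | nil => intro prev; simp [G]
  | cons h t ih =>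
      intro prev
      have hh : h < layer + 1 := hall h List.mem_cons_self
      simp only [G]
      rw [ih (fun x hx => hall x (List.mem_cons_of_mem _ hx))]
      simp only [max_def]; split_ifs <;> omega

theorem aLoop_eq_G (A : List Int) :
    ∀ n layer, (maxA A + 1 - layer).toNat = n → 0 ≤ layer →
      ∀ ans, aLoop A ans layer = ans + G layer 0 A := by
  intro n
  induction n using Nat.strong_induction_on with
  | _ n ih =>
      intro layer hn hl ans
      rw [aLoop.eq_def]
      simp only [aPass_eq, Bool.false_or]
      have hG := G_step A layer 0
      rw [decide_eq_false (by omega : ¬ layer + 1 ≤ (0:Int))] at hG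
      by_cases hp : 0 < passC (layer + 1) false A
      · rw [if_pos (by simpa using hp)]
        obtain ⟨x, hx, hlx⟩ := passC_pos_exists _ _ _ hp
        have hmax := mem_le_maxA A x hx
        have hlt : (maxA A + 1 - (layer + 1)).toNat < n := by omega
        rw [ih _ hlt (layer + 1) rfl (by omega)]
        omega
      · rw [if_neg (by simpa using hp)]
        have hnn := passC_nonneg (layer + 1) A false
        have hz : passC (layer + 1) false A = 0 := by omega
        have hall := passC_zero_all_lt _ _ hz
        rw [G_zero A layer hall 0]
        omega

theorem bFold_eq_G (xs : List Int) :
    ∀ acc prev, (xs.foldl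
      (fun (s : Int × Int) h =>
        (if 0 < h - max s.2 0 then s.1 + (h - max s.2 0) else s.1, h)) (acc, prev)).1
      = acc + G 0 prev xs := by
  induction xs with
  | nil => intro acc prev; simp [G]
  | cons h t ih =>
      intro acc prev
      simp only [List.foldl, G]
      rw [ih]
      split_ifs with hc
      · simp only [max_def]; split_ifs <;> omega
      · simp only [max_def] at hc ⊢; split_ifs at hc ⊢ <;> omega

-- ===== VERDICT (by name: the statement is the Claim_ definition above) =====
theorem solution_spec : Claim_equal_solution := by
  intro A _
  unfold Spec_solution solution solution_alt
  have h1 : aLoop A 0 0 = 0 + G 0 0 A :=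
    aLoop_eq_G A (maxA A + 1 - 0).toNat 0 rfl (by omega) 0
  have h2 := bFold_eq_G A 0 0
  simp only [h1, h2]
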